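-- pv_equiv track=rewrite | github.com/introduction-to-python-2026/ps-4-YonadavAz | string_utils.py | split_before_each_uppercases
-- ===== SOURCE A (Python) =====
-- def split_before_each_uppercases(formula):
--     a= ""
--     c = []
--     b = 0
--     for i in formula:
--         if not i.isdigit():
--             a += i
--         else:
--             c.append(int(i))
--     f = len(c)
--     for x in range(f):
--       z = c[x]
--       b = b*10+z
--     if b == 0:
--       b = 1
--     return a, b
-- ===== SOURCE B (Python) =====
-- def split_before_each_uppercases(formula):
--     # One fused pass: accumulate non-digit chars and the digit value directly.
--     a = ""
--     b = 0
--     for ch in formula: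
--         if ch.isdigit():
--             b = b * 10 + int(ch)
--         else:
--             a += ch
--     return a, (b if b else 1)
-- ===== Notes on version B (the rewrite author's own statement) =====
-- stated objective: simpler
-- what changed: Fuses A's two phases (collect digits into a list, then a separate Horner loop over indices) into one single pass that accumulates the integer directly, eliminating the intermediate list and second loop.
import Mathlib
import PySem

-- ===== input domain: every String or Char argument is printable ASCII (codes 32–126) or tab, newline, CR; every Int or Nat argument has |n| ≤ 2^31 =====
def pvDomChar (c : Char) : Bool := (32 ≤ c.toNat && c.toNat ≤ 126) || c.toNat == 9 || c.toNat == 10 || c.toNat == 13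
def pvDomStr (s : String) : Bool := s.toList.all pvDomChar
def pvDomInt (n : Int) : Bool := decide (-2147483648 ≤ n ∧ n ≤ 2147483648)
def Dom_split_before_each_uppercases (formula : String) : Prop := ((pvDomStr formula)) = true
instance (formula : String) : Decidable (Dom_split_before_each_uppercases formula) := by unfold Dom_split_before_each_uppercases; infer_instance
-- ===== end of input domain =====

-- B fuses A's two phases (collect digit list, then Horner loop) into one single pass; simpler, same result.

-- ===== PORT A =====
-- int(i) for a single character, as in both Pythons (getD 0 is unreachable: the branch runs only on digits)
def pvDigitInt (i : Char) : Int := (PySem.Int.ofChars? [i]).getD 0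

def split_before_each_uppercases (formula : String) : String × Int :=
  -- a = ""; c = []; for i in formula: if not i.isdigit(): a += i else: c.append(int(i))
  let st := formula.toList.foldl
    (fun (st : List Char × List Int) i =>
      if !(PySem.Chars.isdigit i) then (st.1 ++ [i], st.2)
      else (st.1, st.2 ++ [pvDigitInt i])) ([], [])
  let c := st.2
  -- f = len(c); for x in range(f): z = c[x]; b = b*10+z
  let f := PySem.List.len c
  let b := (PySem.List.pyRange 0 f 1).foldl
    (fun b x => b * 10 + PySem.List.pyGetD c x 0) 0
  let b := if b = 0 then 1 else b
  (String.ofList st.1, b)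

-- ===== PORT B =====
def split_before_each_uppercases_alt (formula : String) : String × Int :=
  -- a = ""; b = 0; for ch in formula: if ch.isdigit(): b = b*10 + int(ch) else: a += ch
  let st := formula.toList.foldl
    (fun (st : List Char × Int) ch =>
      if PySem.Chars.isdigit ch then (st.1, st.2 * 10 + pvDigitInt ch)
      else (st.1 ++ [ch], st.2)) ([], 0)
  (String.ofList st.1, if st.2 = 0 then 1 else st.2)

-- ===== PRECONDITION & SPEC =====
def Spec_split_before_each_uppercases (formula : String) (out : String × Int) : Prop := out = split_before_each_uppercases_alt formula
instance (formula : String) (out : String × Int) : Decidable (Spec_split_before_each_uppercases formula out) := by unfold Spec_split_before_each_uppercases; infer_instance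

-- ===== CLAIM (what is proved, stated in full; the proofs are below) =====
def Claim_equal_split_before_each_uppercases : Prop := ∀ (formula : String), Dom_split_before_each_uppercases formula → Spec_split_before_each_uppercases formula (split_before_each_uppercases formula)

-- ===== LEMMAS AND PROOFS =====

-- A's first loop: the pair state splits into the non-digit chars and the digit values.
lemma foldA_eq (l : List Char) (a : List Char) (c : List Int) :
    l.foldl (fun (st : List Char × List Int) i =>
      if !(PySem.Chars.isdigit i) then (st.1 ++ [i], st.2)
      else (st.1, st.2 ++ [pvDigitInt i])) (a, c)
    = (a ++ l.filter (fun i => !(PySem.Chars.isdigit i)),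
       c ++ (l.filter (fun i => PySem.Chars.isdigit i)).map pvDigitInt) := by
  induction l generalizing a c with
  | nil => simp
  | cons x xs ih =>
    by_cases h : PySem.Chars.isdigit x = true
    · rw [List.foldl_cons, if_neg (by simp [h]), ih]; simp [h]
    · rw [List.foldl_cons, if_pos (by simp [h]), ih]; simp [h]

-- B's fused loop: same char split, and the Int component is the Horner fold over the digit values.
lemma foldB_eq (l : List Char) (a : List Char) (b : Int) :
    l.foldl (fun (st : List Char × Int) ch =>
      if PySem.Chars.isdigit ch then (st.1, st.2 * 10 + pvDigitInt ch)
      else (st.1 ++ [ch], st.2)) (a, b)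
    = (a ++ l.filter (fun i => !(PySem.Chars.isdigit i)),
       ((l.filter (fun i => PySem.Chars.isdigit i)).map pvDigitInt).foldl
         (fun b z => b * 10 + z) b) := by
  induction l generalizing a b with
  | nil => simp
  | cons x xs ih =>
    by_cases h : PySem.Chars.isdigit x = true
    · rw [List.foldl_cons, if_pos h, ih]; simp [h]
    · rw [List.foldl_cons, if_neg h, ih]; simp [h]

-- ===== VERDICT (by name: the statement is the Claim_ definition above) =====
theorem split_before_each_uppercases_spec : Claim_equal_split_before_each_uppercases := by
  intro formula _
  show _ = _
  unfold split_before_each_uppercases split_before_each_uppercases_alt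
  simp only [foldA_eq, foldB_eq, List.nil_append]
  simp only [PySem.List.len_eq]
  rw [PySem.List.foldl_pyRange_zero_pyGetD' _ 0 (fun b z => b * 10 + z) 0]
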